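-- pv_equiv track=rewrite | github.com/JinsuElhance/loveasaurus | simpleBeautifulfunctions.py | dashatize
-- ===== SOURCE A (Python) =====
-- def dashatize(n):
--     last = n%10
--     dashed = ""
--     while n > 10:
--         if last % 2 != 0:
--         #if odd
--             dashed =  "-" + str(last) + dashed
--         else:
--             dashed =  str(last) + dashed
--
--         n,last = n//10,(n//10)%10
--     return str(n) + dashed
-- ===== SOURCE B (Python) =====
-- def dashatize(n):
--     if n <= 10:
--         return str(n)
--     head = n
--     while head > 10:
--         head //= 10
--     rest = str(n)[len(str(head)):]
--     return str(head) + ''.join('-' + d if d in '13579' else d for d in rest)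
-- ===== Notes on version B (the rewrite author's own statement) =====
-- stated objective: idiomatic
-- what changed: Replaces the right-to-left modular digit-peeling loop that builds the result by repeated front-prepending with a short divide-only loop to find the surviving head, then a single left-to-right pass over the decimal string's remaining characters.
import Mathlib
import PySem

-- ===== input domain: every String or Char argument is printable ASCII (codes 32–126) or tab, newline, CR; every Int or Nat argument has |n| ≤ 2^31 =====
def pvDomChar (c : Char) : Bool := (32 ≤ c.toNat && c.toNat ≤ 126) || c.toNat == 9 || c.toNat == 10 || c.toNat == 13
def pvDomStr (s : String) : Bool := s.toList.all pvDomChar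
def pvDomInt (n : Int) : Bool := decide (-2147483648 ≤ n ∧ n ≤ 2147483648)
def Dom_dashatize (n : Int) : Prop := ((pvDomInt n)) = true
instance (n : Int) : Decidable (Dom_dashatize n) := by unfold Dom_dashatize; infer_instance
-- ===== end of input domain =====

-- B replaces A's right-to-left modular digit-peeling with string prepending by a divide-only
-- loop for the surviving head plus one left-to-right pass over the remaining decimal characters
-- (objective: more idiomatic; same exact output, including A's n>10 stopping point).

-- ===== PORT A =====
-- strings are carried as their character lists (String.ofList at the end); exact on all inputs
def dashLoop (n last : Int) (dashed : List Char) : List Char :=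
  if h : 10 < n then
    dashLoop (PySem.Int.floordiv n 10) (PySem.Int.mod (PySem.Int.floordiv n 10) 10)
      ((if PySem.Int.mod last 2 ≠ 0 then '-' :: PySem.Int.toChars last else PySem.Int.toChars last) ++ dashed)
  else
    PySem.Int.toChars n ++ dashed
termination_by n.toNat
decreasing_by
  rw [PySem.Int.floordiv_eq_ediv_of_pos (by omega)]
  omega

def dashatize (n : Int) : String :=
  String.ofList (dashLoop n (PySem.Int.mod n 10) [])

-- ===== PORT B =====
def headLoop (h : Int) : Int :=
  if hh : 10 < h then headLoop (PySem.Int.floordiv h 10) else h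
termination_by h.toNat
decreasing_by
  rw [PySem.Int.floordiv_eq_ediv_of_pos (by omega)]
  omega

-- ''.join('-' + d if d in '13579' else d for d in rest)
def dashChars (cs : List Char) : List Char :=
  cs.flatMap (fun d => if d ∈ ['1', '3', '5', '7', '9'] then ['-', d] else [d])

def dashatize_alt (n : Int) : String :=
  if n ≤ 10 then PySem.Int.toStr n
  else
    String.ofList (PySem.Int.toChars (headLoop n) ++
      dashChars (PySem.List.slice (PySem.Int.toChars n)
        (some (PySem.List.len (PySem.Int.toChars (headLoop n)))) none))

-- ===== PRECONDITION & SPEC =====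
def Spec_dashatize (n : Int) (out : String) : Prop := out = dashatize_alt n
instance (n : Int) (out : String) : Decidable (Spec_dashatize n out) := by unfold Spec_dashatize; infer_instance

-- ===== CLAIM (what is proved, stated in full; the proofs are below) =====
def Claim_equal_dashatize : Prop := ∀ (n : Int), Dom_dashatize n → Spec_dashatize n (dashatize n)

-- ===== LEMMAS AND PROOFS =====

theorem tdc_append (f : Nat) : ∀ (n : Nat) (acc : List Char),
    Nat.toDigitsCore 10 f n acc = Nat.toDigitsCore 10 f n [] ++ acc := by
  induction f with
  | zero => intro n acc; simp [Nat.toDigitsCore]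
  | succ f ih =>
    intro n acc
    simp only [Nat.toDigitsCore]
    by_cases h : n / 10 = 0
    · simp [h]
    · simp only [h, if_false]
      rw [ih (n / 10) (Nat.digitChar (n % 10) :: acc), ih (n / 10) [Nat.digitChar (n % 10)]]
      simp

theorem tdc_fuel (n : Nat) : ∀ (f : Nat), n < f →
    Nat.toDigitsCore 10 f n [] = Nat.toDigits 10 n := by
  induction n using Nat.strong_induction_on with
  | _ n ih =>
    intro f h
    obtain ⟨f', rfl⟩ : ∃ f', f = f' + 1 := ⟨f - 1, by omega⟩
    simp only [Nat.toDigits, Nat.toDigitsCore]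
    by_cases h0 : n / 10 = 0
    · simp [h0]
    · simp only [h0, if_false]
      have hlt : n / 10 < n := Nat.div_lt_self (by omega) (by omega)
      rw [tdc_append f', tdc_append n, ih (n / 10) hlt f' (by omega),
        ih (n / 10) hlt n hlt]

theorem toDigits_peel (m : Nat) (h : 10 ≤ m) :
    Nat.toDigits 10 m = Nat.toDigits 10 (m / 10) ++ [Nat.digitChar (m % 10)] := by
  have h0 : ¬ m / 10 = 0 := by omega
  conv_lhs => rw [Nat.toDigits]
  simp only [Nat.toDigitsCore, h0, if_false]
  rw [tdc_append m, tdc_fuel (m / 10) m (by omega)]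

theorem toChars_peel (n : Int) (h : 10 < n) :
    PySem.Int.toChars n =
      PySem.Int.toChars (PySem.Int.floordiv n 10) ++
        [Nat.digitChar (PySem.Int.mod n 10).toNat] := by
  obtain ⟨m, rfl⟩ : ∃ m : Nat, n = (m : Int) := ⟨n.toNat, by omega⟩
  have h10 : (10 : Int) = ((10 : Nat) : Int) := rfl
  rw [h10, PySem.Int.floordiv_natCast, PySem.Int.mod_natCast]
  have hm : 10 ≤ m := by exact_mod_cast h.le
  have e1 : ¬ ((m : Int) < 0) := by omega
  have e2 : ¬ (((m / 10 : Nat) : Int) < 0) := by omega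
  simp only [PySem.Int.toChars, e1, e2, if_false, Int.toNat_natCast]
  exact toDigits_peel m hm

theorem dd_digit (r : Int) (h0 : 0 ≤ r) (h10 : r < 10) :
    (if PySem.Int.mod r 2 ≠ 0 then '-' :: PySem.Int.toChars r else PySem.Int.toChars r) =
      dashChars [Nat.digitChar r.toNat] := by
  interval_cases r <;> decide

theorem main_lemma (k : Nat) : ∀ (n : Int), n.toNat ≤ k → 10 < n →
    ∃ t, PySem.Int.toChars n = PySem.Int.toChars (headLoop n) ++ t ∧
      ∀ dashed, dashLoop n (PySem.Int.mod n 10) dashed =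
        PySem.Int.toChars (headLoop n) ++ (dashChars t ++ dashed) := by
  induction k with
  | zero => intro n hk hn; omega
  | succ k ih =>
    intro n hk hn
    have hq : PySem.Int.floordiv n 10 = n / 10 :=
      PySem.Int.floordiv_eq_ediv_of_pos (by omega)
    have hqk : (PySem.Int.floordiv n 10).toNat ≤ k := by rw [hq]; omega
    have hpeel := toChars_peel n hn
    have hdd := dd_digit (PySem.Int.mod n 10)
      (by rw [PySem.Int.mod_eq_emod_of_pos (by omega)]; omega)
      (by rw [PySem.Int.mod_eq_emod_of_pos (by omega)]; omega)
    have hHead : headLoop n = headLoop (PySem.Int.floordiv n 10) := by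
      rw [headLoop, dif_pos hn]
    by_cases hq10 : 10 < PySem.Int.floordiv n 10
    · obtain ⟨t', ht', hloop⟩ := ih (PySem.Int.floordiv n 10) hqk hq10
      refine ⟨t' ++ [Nat.digitChar (PySem.Int.mod n 10).toNat], ?_, ?_⟩
      · rw [hpeel, hHead, ht']; simp
      · intro dashed
        rw [dashLoop, dif_pos hn, hloop, hHead, hdd]
        simp [dashChars, List.flatMap_append]
    · have hHead2 : headLoop n = PySem.Int.floordiv n 10 := by
        rw [hHead, headLoop, dif_neg hq10]
      refine ⟨[Nat.digitChar (PySem.Int.mod n 10).toNat], ?_, ?_⟩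
      · rw [hpeel, hHead2]
      · intro dashed
        rw [dashLoop, dif_pos hn, dashLoop, dif_neg hq10, hHead2, hdd]

-- ===== VERDICT (by name: the statement is the Claim_ definition above) =====
theorem dashatize_spec : Claim_equal_dashatize := by
  intro n _
  unfold Spec_dashatize dashatize dashatize_alt
  by_cases hn : 10 < n
  · rw [if_neg (by omega)]
    obtain ⟨t, ht, hloop⟩ := main_lemma n.toNat n le_rfl hn
    rw [hloop []]
    rw [PySem.List.len_eq, PySem.List.slice_from_natCast, ht, List.drop_left]
    simp
  · rw [if_pos (by omega), dashLoop, dif_neg hn]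
    simp [PySem.Int.toStr]
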